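-- pv_equiv track=rewrite | github.com/akib35/leetCode-X-Practice | daily/find-sum-of-array-prod-of-magical-sequence.py | magicalSum
-- ===== SOURCE A (Python) =====
-- from functools import lru_cache
-- import math
--
-- MOD = 10**9 + 7
--
-- def magicalSum(total_count: int, target_odd: int, numbers: list[int]) -> int:
--     @lru_cache(None)
--     def dfs(remaining: int, odd_left: int, i: int, carry: int) -> int:
--         # Base cases
--         if (
--             remaining < 0
--             or odd_left < 0
--             or remaining + carry.bit_count() < odd_left
--         ):
--             return 0
--         if remaining == 0:
--             # Check if the number of odd bits in carry matches the target
--             return 1 if carry.bit_count() == odd_left else 0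
--         if i == len(numbers):
--             return 0
--
--         total = 0
--         # Try taking 0 to 'remaining' elements from numbers[i]
--         for count in range(remaining + 1):
--             ways = math.comb(remaining, count) * pow(numbers[i], count, MOD) % MOD
--             new_carry = carry + count
--             # Subtract 1 if new_carry is odd
--             odd_adjust = new_carry % 2
--             total += ways * dfs(
--                 remaining - count, odd_left - odd_adjust, i + 1, new_carry // 2
--             )
--             total %= MOD
--
--         return total
--
--     return dfs(total_count, target_odd, 0, 0)
-- ===== SOURCE B (Python) =====
-- import math
--
-- MOD = 10**9 + 7
--
-- def _terminal(rem: int, odd: int, carry: int) -> int: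
--     # value of a finished state: all positions consumed
--     if rem < 0 or odd < 0 or rem + carry.bit_count() < odd:
--         return 0
--     if rem == 0:
--         return 1 if carry.bit_count() == odd else 0
--     return 0
--
-- def magicalSum(total_count: int, target_odd: int, numbers: list[int]) -> int:
--     # forward (push) DP over reachable states instead of memoized recursion
--     dp = {(total_count, target_odd, 0): 1}
--     for x in numbers:
--         ndp = {}
--         for (rem, odd, carry), ways in dp.items():
--             if odd < 0 or rem + carry.bit_count() < odd:
--                 continue  # dead state: can never reach the target, contributes 0
--             for count in range(rem + 1):
--                 w = math.comb(rem, count) * pow(x, count, MOD) % MOD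
--                 nc = carry + count
--                 key = (rem - count, odd - nc % 2, nc // 2)
--                 ndp[key] = (ndp.get(key, 0) + ways * w) % MOD
--         dp = ndp
--     ans = 0
--     for (rem, odd, carry), ways in dp.items():
--         ans = (ans + ways * _terminal(rem, odd, carry)) % MOD
--     return ans
-- ===== Notes on version B (the rewrite author's own statement) =====
-- stated objective: alternative
-- what changed: Replaced the memoized top-down recursion over (remaining, odd_left, i, carry) by a bottom-up forward DP that pushes a dict of reachable (remaining, odd_left, carry) states with their accumulated weights through the numbers one by one and finally sums weight times a closed terminal evaluation, all sums taken mod 10**9+7.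
import Mathlib
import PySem

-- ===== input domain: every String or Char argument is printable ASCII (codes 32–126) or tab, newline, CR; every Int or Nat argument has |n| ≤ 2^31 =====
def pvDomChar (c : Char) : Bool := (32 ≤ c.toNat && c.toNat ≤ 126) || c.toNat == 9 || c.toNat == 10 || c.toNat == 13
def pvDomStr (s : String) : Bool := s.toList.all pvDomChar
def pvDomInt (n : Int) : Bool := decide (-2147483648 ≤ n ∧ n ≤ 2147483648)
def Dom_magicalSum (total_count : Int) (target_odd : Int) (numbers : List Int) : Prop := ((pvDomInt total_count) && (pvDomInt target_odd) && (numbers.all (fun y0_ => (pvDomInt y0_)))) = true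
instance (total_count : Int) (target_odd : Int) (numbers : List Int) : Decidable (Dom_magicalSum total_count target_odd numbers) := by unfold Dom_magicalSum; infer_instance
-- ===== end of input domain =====

-- B is an alternative, structurally different implementation: a forward ("push") dict DP over
-- reachable states instead of A's memoized top-down recursion; same asymptotics, same results.

-- ===== PORT A =====
def pvMOD : Int := 1000000007

-- A's dfs; the index i is represented by the suffix of numbers (i == len(numbers) ↔ [])
def pvDfs (rem odd : Int) (nums : List Int) (carry : Int) : Int :=
  if rem < 0 ∨ odd < 0 ∨ rem + (PySem.Int.bitCount carry : Int) < odd then 0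
  else if rem = 0 then (if (PySem.Int.bitCount carry : Int) = odd then 1 else 0)
  else
    match nums with
    | [] => 0
    | x :: rest =>
      (PySem.List.pyRange 0 (rem + 1) 1).foldl
        (fun total count =>
          PySem.Int.mod
            (total +
              PySem.Int.mod ((rem.toNat.choose count.toNat : Int) * PySem.Int.powMod x count.toNat pvMOD) pvMOD *
                pvDfs (rem - count) (odd - PySem.Int.mod (carry + count) 2) rest
                  (PySem.Int.floordiv (carry + count) 2))
            pvMOD)
        0
termination_by nums.length
decreasing_by simp

def magicalSum (total_count : Int) (target_odd : Int) (numbers : List Int) : Int :=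
  pvDfs total_count target_odd numbers 0

-- ===== PORT B =====
-- Source B's _terminal
def pvTerm (rem odd carry : Int) : Int :=
  if rem < 0 ∨ odd < 0 ∨ rem + (PySem.Int.bitCount carry : Int) < odd then 0
  else if rem = 0 then (if (PySem.Int.bitCount carry : Int) = odd then 1 else 0)
  else 0

-- body of the innermost loop: ndp[key] = (ndp.get(key, 0) + ways * w) % MOD
def pvIns (x rem odd carry ways : Int) (ndp : PySem.Dict (Int × Int × Int) Int) (count : Int) :
    PySem.Dict (Int × Int × Int) Int :=
  let w := PySem.Int.mod ((rem.toNat.choose count.toNat : Int) * PySem.Int.powMod x count.toNat pvMOD) pvMOD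
  let nc := carry + count
  let key := (rem - count, odd - PySem.Int.mod nc 2, PySem.Int.floordiv nc 2)
  ndp.insert key (PySem.Int.mod (ndp.getD key 0 + ways * w) pvMOD)

-- loop over one dp entry: skip dead states, else for count in range(rem + 1)
def pvEntry (x : Int) (ndp : PySem.Dict (Int × Int × Int) Int) (kv : (Int × Int × Int) × Int) :
    PySem.Dict (Int × Int × Int) Int :=
  if kv.1.2.1 < 0 ∨ kv.1.1 + (PySem.Int.bitCount kv.1.2.2 : Int) < kv.1.2.1 then ndp
  else (PySem.List.pyRange 0 (kv.1.1 + 1) 1).foldl (pvIns x kv.1.1 kv.1.2.1 kv.1.2.2 kv.2) ndp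

-- one step of the forward DP: for (state, ways) in dp.items(): …
def pvStep (dp : PySem.Dict (Int × Int × Int) Int) (x : Int) : PySem.Dict (Int × Int × Int) Int :=
  dp.items.foldl (pvEntry x) PySem.Dict.empty

def magicalSum_alt (total_count : Int) (target_odd : Int) (numbers : List Int) : Int :=
  let dp := numbers.foldl pvStep (PySem.Dict.empty.insert (total_count, target_odd, (0 : Int)) 1)
  dp.items.foldl (fun ans kv => PySem.Int.mod (ans + kv.2 * pvTerm kv.1.1 kv.1.2.1 kv.1.2.2) pvMOD) 0

-- ===== PRECONDITION & SPEC =====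
def Spec_magicalSum (total_count : Int) (target_odd : Int) (numbers : List Int) (out : Int) : Prop := out = magicalSum_alt total_count target_odd numbers
instance (total_count : Int) (target_odd : Int) (numbers : List Int) (out : Int) : Decidable (Spec_magicalSum total_count target_odd numbers out) := by unfold Spec_magicalSum; infer_instance

-- ===== CLAIM (what is proved, stated in full; the proofs are below) =====
def Claim_equal_magicalSum : Prop := ∀ (total_count : Int) (target_odd : Int) (numbers : List Int), Dom_magicalSum total_count target_odd numbers → Spec_magicalSum total_count target_odd numbers (magicalSum total_count target_odd numbers)

-- ===== LEMMAS AND PROOFS =====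

-- value of a single dict entry against A's recursion on the remaining suffix ns
def pvF (ns : List Int) (k : Int × Int × Int) : Int := pvDfs k.1 k.2.1 ns k.2.2

-- weighted sum of an items list against pvF
def pvWsum (l : List ((Int × Int × Int) × Int)) (ns : List Int) : Int :=
  (l.map (fun kv => kv.2 * pvF ns kv.1)).sum

lemma pvmod_emod (a : Int) : PySem.Int.mod a pvMOD = a % pvMOD :=
  PySem.Int.mod_eq_emod_of_pos (by norm_num [pvMOD])

lemma pvmod2 (a : Int) : PySem.Int.mod a 2 = a % 2 :=
  PySem.Int.mod_eq_emod_of_pos (by norm_num)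

lemma pvdiv2 (a : Int) : PySem.Int.floordiv a 2 = a / 2 :=
  PySem.Int.floordiv_eq_ediv_of_pos (by norm_num)

lemma pv_bc_half (nc : Int) (h : 0 ≤ nc) :
    (PySem.Int.bitCount nc : Int) = nc % 2 + (PySem.Int.bitCount (nc / 2) : Int) := by
  rcases eq_or_lt_of_le h with h0 | hpos
  · rw [← h0]; simp [PySem.Int.bitCount_zero]
  · have hrec := PySem.Int.bitCount_of_pos hpos
    rw [pvmod2, pvdiv2] at hrec
    rw [hrec]
    have h2 : (0:Int) ≤ nc % 2 := Int.emod_nonneg nc (by norm_num)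
    push_cast
    omega

lemma pv_bc_succ (a : Nat) :
    PySem.Int.bitCount ((a : Int) + 1) ≤ PySem.Int.bitCount (a : Int) + 1 := by
  induction a using Nat.strong_induction_on with
  | _ a ih =>
    rcases Nat.eq_zero_or_pos a with rfl | hpos
    · decide
    · have hcast : ((a : Int) + 1) = (((a + 1 : Nat)) : Int) := by push_cast; ring
      rw [hcast, PySem.Int.bitCount_natCast (by omega), PySem.Int.bitCount_natCast hpos]
      rcases Nat.even_or_odd a with he | ho
      · have hm : a % 2 = 0 := Nat.even_iff.mp he
        have h1 : (a + 1) % 2 = 1 := by omega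
        have h2 : (a + 1) / 2 = a / 2 := by omega
        rw [h1, h2, hm]; omega
      · have hm : a % 2 = 1 := Nat.odd_iff.mp ho
        have h1 : (a + 1) % 2 = 0 := by omega
        have h2 : (a + 1) / 2 = a / 2 + 1 := by omega
        have ihh := ih (a / 2) (by omega)
        have hcast2 : ((a / 2 : Nat) : Int) + 1 = (((a / 2 + 1 : Nat)) : Int) := by push_cast; ring
        rw [hcast2] at ihh
        rw [h1, h2, hm]
        omega

lemma pv_bc_add_le (c k : Int) (hc : 0 ≤ c) (hk : 0 ≤ k) :
    (PySem.Int.bitCount (c + k) : Int) ≤ (PySem.Int.bitCount c : Int) + k := by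
  have aux : ∀ (kn an : Nat), PySem.Int.bitCount ((an : Int) + (kn : Int)) ≤ PySem.Int.bitCount (an : Int) + kn := by
    intro kn
    induction kn with
    | zero => intro an; simp
    | succ m ihm =>
      intro an
      have h1 : ((an : Int) + ((m + 1 : Nat) : Int)) = (((an + m : Nat)) : Int) + 1 := by push_cast; ring
      rw [h1]
      calc PySem.Int.bitCount (((an + m : Nat) : Int) + 1)
          ≤ PySem.Int.bitCount (((an + m : Nat)) : Int) + 1 := pv_bc_succ _
        _ ≤ PySem.Int.bitCount (an : Int) + m + 1 := by
              have := ihm an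
              have h2 : (((an + m : Nat)) : Int) = (an : Int) + (m : Int) := by push_cast; ring
              rw [h2]; omega
        _ = PySem.Int.bitCount (an : Int) + (m + 1) := by omega
  obtain ⟨cn, rfl⟩ : ∃ n : Nat, c = (n : Int) := ⟨c.toNat, by omega⟩
  obtain ⟨kn, rfl⟩ : ∃ n : Nat, k = (n : Int) := ⟨k.toNat, by omega⟩
  have := aux kn cn
  omega

-- A's base cases, as standalone facts
lemma pvDfs_zero (rem odd : Int) (ns : List Int) (carry : Int)
    (h : rem < 0 ∨ odd < 0 ∨ rem + (PySem.Int.bitCount carry : Int) < odd) :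
    pvDfs rem odd ns carry = 0 := by
  rw [pvDfs.eq_def, if_pos h]

lemma pvDfs_rem0 (odd : Int) (ns : List Int) (carry : Int) :
    pvDfs 0 odd ns carry = if (PySem.Int.bitCount carry : Int) = odd then 1 else 0 := by
  rw [pvDfs.eq_def]
  have hbc : (0:Int) ≤ (PySem.Int.bitCount carry : Int) := Int.natCast_nonneg _
  split_ifs with h1 h2 <;> first | rfl | omega


-- a running-mod accumulation loop computes the sum mod pvMOD
lemma pv_foldl_modsum {α : Type} (g : α → Int) (l : List α) :
    l.foldl (fun t c => (t + g c) % pvMOD) 0 = (l.map g).sum % pvMOD := by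
  have aux1 : ∀ (l : List α) (init : Int),
      (l.foldl (fun t c => (t + g c) % pvMOD) init) % pvMOD = (init + (l.map g).sum) % pvMOD := by
    intro l
    induction l with
    | nil => intro init; simp
    | cons c t ih =>
      intro init
      simp only [List.foldl_cons, List.map_cons, List.sum_cons]
      rw [ih]
      simp only [pvMOD]
      omega
  have aux2 : ∀ (l : List α) (init : Int), 0 ≤ init → init < pvMOD →
      0 ≤ l.foldl (fun t c => (t + g c) % pvMOD) init ∧
      l.foldl (fun t c => (t + g c) % pvMOD) init < pvMOD := by
    intro l
    induction l with
    | nil => intro init h1 h2; exact ⟨h1, h2⟩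
    | cons c t ih =>
      intro init h1 h2
      simp only [List.foldl_cons]
      exact ih _ (Int.emod_nonneg _ (by norm_num [pvMOD])) (Int.emod_lt_of_pos _ (by norm_num [pvMOD]))
  cases l with
  | nil => simp
  | cons c t =>
    have h := aux2 (c :: t) 0 le_rfl (by norm_num [pvMOD])
    have h1 := aux1 (c :: t) 0
    rw [← Int.emod_eq_of_lt h.1 h.2, h1]
    simp

lemma pvDfs_emod (rem odd : Int) (ns : List Int) (carry : Int) :
    pvDfs rem odd ns carry % pvMOD = pvDfs rem odd ns carry := by
  rw [pvDfs.eq_def]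
  split_ifs with h1 h2 h3
  · simp
  · norm_num [pvMOD]
  · simp
  · cases ns with
    | nil => simp
    | cons x rest =>
      simp only [pvmod_emod]
      rw [pv_foldl_modsum (fun count => (rem.toNat.choose count.toNat : Int) * PySem.Int.powMod x count.toNat pvMOD % pvMOD
            * pvDfs (rem - count) (odd - PySem.Int.mod (carry + count) 2) rest (PySem.Int.floordiv (carry + count) 2))]
      simp [Int.emod_emod_of_dvd]

-- the key identity: one level of A's recursion, as a plain sum over the counts
def pvW (rem x c : Int) : Int :=
  PySem.Int.mod ((rem.toNat.choose c.toNat : Int) * PySem.Int.powMod x c.toNat pvMOD) pvMOD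

def pvChild (rem odd carry c : Int) : Int × Int × Int :=
  (rem - c, odd - PySem.Int.mod (carry + c) 2, PySem.Int.floordiv (carry + c) 2)

lemma pvDfs_expand (rem odd carry x : Int) (ns : List Int) (hc : 0 ≤ carry) :
    pvDfs rem odd (x :: ns) carry =
      ((PySem.List.pyRange 0 (rem + 1) 1).map
        (fun c => pvW rem x c * pvF ns (pvChild rem odd carry c))).sum % pvMOD := by
  rw [pvDfs.eq_def]
  by_cases h1 : rem < 0 ∨ odd < 0 ∨ rem + (PySem.Int.bitCount carry : Int) < odd
  · rw [if_pos h1]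
    symm
    by_cases hr : rem < 0
    · rw [PySem.List.pyRange_one_eq_nil (by omega)]; simp
    · have hz : ∀ c ∈ PySem.List.pyRange 0 (rem + 1) 1,
          pvW rem x c * pvF ns (pvChild rem odd carry c) = 0 := by
        intro c hcmem
        obtain ⟨hc0, hcr⟩ := PySem.List.mem_pyRange_one.mp hcmem
        have hnc : (0:Int) ≤ carry + c := by omega
        have hmod : (0:Int) ≤ (carry + c) % 2 := Int.emod_nonneg _ (by norm_num)
        have hchild0 : pvF ns (pvChild rem odd carry c) = 0 := by
          unfold pvF pvChild
          simp only [pvmod2, pvdiv2]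
          apply pvDfs_zero
          rcases h1 with h1 | h1 | h1
          · omega
          · right; left; omega
          · right; right
            have hhalf := pv_bc_half (carry + c) hnc
            have hadd := pv_bc_add_le carry c hc hc0
            omega
        rw [hchild0, mul_zero]
      rw [List.sum_eq_zero (by intro y hy; obtain ⟨c, hcm, rfl⟩ := List.mem_map.mp hy; exact hz c hcm)]
      simp
  · rw [if_neg h1]
    by_cases h2 : rem = 0
    · rw [if_pos h2]
      subst h2
      have hpy : PySem.List.pyRange 0 (0 + 1) 1 = [0] := by decide
      rw [hpy]
      simp only [List.map_cons, List.map_nil, List.sum_cons, List.sum_nil, add_zero]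
      have hW : pvW 0 x 0 = 1 := by
        simp [pvW, PySem.Int.powMod, pvMOD]
      have hF : pvF ns (pvChild 0 odd carry 0) =
          if (PySem.Int.bitCount (carry / 2) : Int) = odd - carry % 2 then 1 else 0 := by
        unfold pvF pvChild
        simp only [pvmod2, pvdiv2, add_zero, sub_zero]
        exact pvDfs_rem0 _ _ _
      have hhalf := pv_bc_half carry hc
      rw [hW, hF, one_mul]
      by_cases hcond : (PySem.Int.bitCount carry : Int) = odd
      · rw [if_pos hcond, if_pos (by omega)]
        norm_num [pvMOD]
      · rw [if_neg hcond, if_neg (by omega)]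
        simp
    · rw [if_neg h2]
      simp only [pvmod_emod, pvW, pvChild, pvF]
      rw [pv_foldl_modsum (fun count => (rem.toNat.choose count.toNat : Int) * PySem.Int.powMod x count.toNat pvMOD % pvMOD
            * pvDfs (rem - count) (odd - PySem.Int.mod (carry + count) 2) ns (PySem.Int.floordiv (carry + count) 2))]

-- replacing the (unique) entry with key k in an assoc list, seen through a sum
lemma pv_sum_replace (φ : (Int × Int × Int) × Int → Int) (k : Int × Int × Int) (w : Int) :
    ∀ (l : List ((Int × Int × Int) × Int)) (v0 : Int), (l.map Prod.fst).Nodup → (k, v0) ∈ l →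
      ((l.map (fun p => if p.1 == k then (k, w) else p)).map φ).sum
        = (l.map φ).sum - φ (k, v0) + φ (k, w) := by
  intro l
  induction l with
  | nil => intro v0 _ hm; cases hm
  | cons p t ih =>
    intro v0 hnd hm
    simp only [List.map_cons, List.sum_cons] at *
    have hnd' := List.nodup_cons.mp hnd
    by_cases hpk : p.1 = k
    · have hpt : ∀ q ∈ t, q.1 ≠ k := by
        intro q hq hqk
        exact hnd'.1 (by rw [hpk, ← hqk]; exact List.mem_map_of_mem hq)
      have hp : p = (k, v0) := by
        rcases List.mem_cons.mp hm with h | h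
        · exact h.symm
        · exact absurd rfl (hpt _ h)
      have hid : t.map (fun p => if p.1 == k then (k, w) else p) = t := by
        conv_rhs => rw [← List.map_id t]
        refine List.map_congr_left ?_
        intro q hq
        simp [hpt q hq]
      rw [if_pos (by simp [hpk]), hid, hp]
      ring
    · have hmt : (k, v0) ∈ t := by
        rcases List.mem_cons.mp hm with h | h
        · exact absurd (by rw [← h]) hpk
        · exact h
      rw [if_neg (by simp [hpk]), ih v0 hnd'.2 hmt]
      ring

-- inserting (getD + a) % MOD shifts the weighted sum by a * pvF, mod pvMOD
lemma pv_wsum_insert (d : PySem.Dict (Int × Int × Int) Int) (k : Int × Int × Int) (a : Int)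
    (ns : List Int) (hnd : d.keys.Nodup) :
    pvWsum ((d.insert k (PySem.Int.mod (d.getD k 0 + a) pvMOD)).items) ns % pvMOD
      = (pvWsum d.items ns + a * pvF ns k) % pvMOD := by
  have hmul : ∀ (u F : Int), (u % pvMOD * F) % pvMOD = (u * F) % pvMOD := by
    intro u F
    rw [Int.mul_emod, Int.emod_emod_of_dvd _ dvd_rfl, ← Int.mul_emod]
  cases hcon : d.contains k with
  | false =>
    rw [PySem.Dict.items_insert_of_not_contains d _ hcon, PySem.Dict.getD_of_not_contains d 0 hcon]
    unfold pvWsum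
    rw [List.map_append, List.sum_append]
    simp only [List.map_cons, List.map_nil, List.sum_cons, List.sum_nil, add_zero, zero_add, pvmod_emod]
    rw [Int.add_emod _ (a % pvMOD * pvF ns k), hmul, ← Int.add_emod]
  | true =>
    have hk : k ∈ d.keys := by
      rw [PySem.Dict.contains_eq_decide_mem_keys] at hcon
      exact of_decide_eq_true hcon
    simp only [PySem.Dict.keys] at hk hnd
    obtain ⟨p, hp, hp1⟩ := List.mem_map.mp hk
    have hmem : (k, p.2) ∈ d.items := by rwa [← hp1, Prod.mk.eta]
    have hget : d.getD k 0 = p.2 := PySem.Dict.getD_of_mem_items d hmem (by simpa [PySem.Dict.keys] using hnd) 0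
    rw [PySem.Dict.items_insert_of_contains d _ hcon, hget]
    unfold pvWsum
    rw [pv_sum_replace _ k _ d.items p.2 hnd hmem]
    simp only [pvmod_emod]
    rw [Int.add_emod _ ((p.2 + a) % pvMOD * pvF ns k), hmul, ← Int.add_emod]
    congr 1
    ring

def pvInv (d : PySem.Dict (Int × Int × Int) Int) : Prop :=
  d.keys.Nodup ∧ ∀ kv ∈ d.items, 0 ≤ kv.1.2.2

lemma pv_inner_aux (x : Int) (ns : List Int) (rem odd carry ways : Int) (hc : 0 ≤ carry) :
    ∀ (cl : List Int) (ndp : PySem.Dict (Int × Int × Int) Int), pvInv ndp → (∀ c ∈ cl, 0 ≤ c) →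
      pvInv (cl.foldl (pvIns x rem odd carry ways) ndp) ∧
      pvWsum (cl.foldl (pvIns x rem odd carry ways) ndp).items ns % pvMOD
        = (pvWsum ndp.items ns
            + (cl.map (fun c => ways * (pvW rem x c * pvF ns (pvChild rem odd carry c)))).sum) % pvMOD := by
  intro cl
  induction cl with
  | nil => intro ndp hinv _; exact ⟨hinv, by simp⟩
  | cons c ct ih =>
    intro ndp hinv hcl
    have hc0 : (0:Int) ≤ c := hcl c (List.mem_cons_self)
    have hkey : pvIns x rem odd carry ways ndp c
        = ndp.insert (pvChild rem odd carry c)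
            (PySem.Int.mod (ndp.getD (pvChild rem odd carry c) 0 + ways * pvW rem x c) pvMOD) := by
      simp only [pvIns, pvW, pvChild]
    have hinv1 : pvInv (pvIns x rem odd carry ways ndp c) := by
      rw [hkey]
      constructor
      · exact PySem.Dict.nodup_keys_insert _ _ _ hinv.1
      · intro kv hkv
        rcases (PySem.Dict.mem_items_insert _ _ _ _).mp hkv with h | h
        · rw [h]
          show (0:Int) ≤ PySem.Int.floordiv (carry + c) 2
          rw [pvdiv2]
          exact Int.ediv_nonneg (by omega) (by norm_num)
        · exact hinv.2 kv h.1
    have hsum1 : pvWsum (pvIns x rem odd carry ways ndp c).items ns % pvMOD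
        = (pvWsum ndp.items ns + ways * (pvW rem x c * pvF ns (pvChild rem odd carry c))) % pvMOD := by
      rw [hkey, pv_wsum_insert ndp _ _ ns hinv.1]
      congr 2
      ring
    obtain ⟨hinv2, hsum2⟩ := ih (pvIns x rem odd carry ways ndp c) hinv1 (fun c' hc' => hcl c' (List.mem_cons_of_mem _ hc'))
    refine ⟨hinv2, ?_⟩
    simp only [List.foldl_cons, List.map_cons, List.sum_cons]
    rw [hsum2]
    have hM : (0:Int) < pvMOD := by norm_num [pvMOD]
    simp only [pvMOD] at hsum1 ⊢
    omega

lemma pv_entry (x : Int) (ns : List Int) (ndp : PySem.Dict (Int × Int × Int) Int)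
    (kv : (Int × Int × Int) × Int) (hinv : pvInv ndp) (hc : 0 ≤ kv.1.2.2) :
    pvInv (pvEntry x ndp kv) ∧
    pvWsum (pvEntry x ndp kv).items ns % pvMOD
      = (pvWsum ndp.items ns + kv.2 * pvF (x :: ns) kv.1) % pvMOD := by
  obtain ⟨⟨rem, odd, carry⟩, ways⟩ := kv
  simp only at hc
  by_cases hg : odd < 0 ∨ rem + (PySem.Int.bitCount carry : Int) < odd
  · simp only [pvEntry]
    rw [if_pos hg]
    refine ⟨hinv, ?_⟩
    have hz : pvF (x :: ns) ((rem, odd, carry) : Int × Int × Int) = 0 := by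
      apply pvDfs_zero
      rcases hg with hg | hg
      · exact Or.inr (Or.inl hg)
      · exact Or.inr (Or.inr hg)
    rw [hz, mul_zero, add_zero]
  obtain ⟨hinv2, hsum⟩ := pv_inner_aux x ns rem odd carry ways hc (PySem.List.pyRange 0 (rem + 1) 1) ndp hinv
      (fun c hc' => (PySem.List.mem_pyRange_one.mp hc').1)
  simp only [pvEntry]
  rw [if_neg hg]
  refine ⟨hinv2, ?_⟩
  rw [hsum, PySem.List.sum_map_const_mul_int]
  rw [show pvF (x :: ns) ((rem, odd, carry) : Int × Int × Int) = pvDfs rem odd (x :: ns) carry from rfl,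
      pvDfs_expand rem odd carry x ns hc]
  rw [Int.add_emod (pvWsum ndp.items ns)
        (ways * (((PySem.List.pyRange 0 (rem + 1) 1).map (fun c => pvW rem x c * pvF ns (pvChild rem odd carry c))).sum % pvMOD)),
      Int.mul_emod ways, Int.emod_emod_of_dvd _ dvd_rfl, ← Int.mul_emod, ← Int.add_emod]

lemma pv_step_aux (x : Int) (ns : List Int) :
    ∀ (il : List ((Int × Int × Int) × Int)) (ndp : PySem.Dict (Int × Int × Int) Int),
      pvInv ndp → (∀ kv ∈ il, 0 ≤ kv.1.2.2) →
      pvInv (il.foldl (pvEntry x) ndp) ∧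
      pvWsum (il.foldl (pvEntry x) ndp).items ns % pvMOD
        = (pvWsum ndp.items ns + pvWsum il (x :: ns)) % pvMOD := by
  intro il
  induction il with
  | nil => intro ndp hinv _; exact ⟨hinv, by simp [pvWsum]⟩
  | cons kv t ih =>
    intro ndp hinv hil
    have hc : (0:Int) ≤ kv.1.2.2 := hil kv (List.mem_cons_self)
    obtain ⟨hinv1, hsum1⟩ := pv_entry x ns ndp kv hinv hc
    obtain ⟨hinv2, hsum2⟩ := ih (pvEntry x ndp kv) hinv1 (fun kv' h => hil kv' (List.mem_cons_of_mem _ h))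
    refine ⟨hinv2, ?_⟩
    simp only [List.foldl_cons]
    rw [hsum2]
    have hw : pvWsum (kv :: t) (x :: ns) = kv.2 * pvF (x :: ns) kv.1 + pvWsum t (x :: ns) := by
      simp [pvWsum]
    rw [hw]
    simp only [pvMOD] at hsum1 ⊢
    omega

lemma pv_step (x : Int) (ns : List Int) (dp : PySem.Dict (Int × Int × Int) Int) (hinv : pvInv dp) :
    pvInv (pvStep dp x) ∧
    pvWsum (pvStep dp x).items ns % pvMOD = pvWsum dp.items (x :: ns) % pvMOD := by
  have hempty : pvInv (PySem.Dict.empty : PySem.Dict (Int × Int × Int) Int) := by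
    constructor
    · simp [PySem.Dict.keys_empty]
    · intro kv hkv
      simp only [show (PySem.Dict.empty : PySem.Dict (Int × Int × Int) Int).items = [] from rfl] at hkv
      cases hkv
  obtain ⟨hinv1, hsum1⟩ := pv_step_aux x ns dp.items PySem.Dict.empty hempty hinv.2
  simp only [pvStep]
  refine ⟨hinv1, ?_⟩
  rw [hsum1]
  simp only [show (PySem.Dict.empty : PySem.Dict (Int × Int × Int) Int).items = [] from rfl]
  simp [pvWsum]

lemma pv_outer : ∀ (ns : List Int) (dp : PySem.Dict (Int × Int × Int) Int), pvInv dp →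
    pvInv (ns.foldl pvStep dp) ∧
    pvWsum (ns.foldl pvStep dp).items [] % pvMOD = pvWsum dp.items ns % pvMOD := by
  intro ns
  induction ns with
  | nil => intro dp hinv; exact ⟨hinv, rfl⟩
  | cons x t ih =>
    intro dp hinv
    obtain ⟨hinv1, hsum1⟩ := pv_step x t dp hinv
    obtain ⟨hinv2, hsum2⟩ := ih (pvStep dp x) hinv1
    exact ⟨hinv2, by rw [List.foldl_cons, hsum2, hsum1]⟩

lemma pvTerm_eq (rem odd carry : Int) : pvTerm rem odd carry = pvDfs rem odd [] carry := by
  rw [pvDfs.eq_def]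
  simp only [pvTerm]

-- ===== VERDICT (by name: the statement is the Claim_ definition above) =====
theorem magicalSum_spec : Claim_equal_magicalSum := by
  intro tc0 tg0 ns _
  unfold Spec_magicalSum magicalSum magicalSum_alt
  have hd0items : ((PySem.Dict.empty : PySem.Dict (Int × Int × Int) Int).insert (tc0, tg0, (0:Int)) 1).items
      = [((tc0, tg0, 0), 1)] := by
    rw [PySem.Dict.items_insert_of_not_contains _ _ (PySem.Dict.contains_empty _)]
    rfl
  have hinv0 : pvInv ((PySem.Dict.empty : PySem.Dict (Int × Int × Int) Int).insert (tc0, tg0, (0:Int)) 1) := by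
    constructor
    · simp [PySem.Dict.keys, hd0items]
    · intro kv hkv
      rw [hd0items, List.mem_singleton] at hkv
      rw [hkv]
  obtain ⟨hinvF, hsumF⟩ := pv_outer ns _ hinv0
  simp only [pvmod_emod]
  rw [pv_foldl_modsum (fun kv : (Int × Int × Int) × Int => kv.2 * pvTerm kv.1.1 kv.1.2.1 kv.1.2.2)]
  have hw : ((ns.foldl pvStep ((PySem.Dict.empty : PySem.Dict (Int × Int × Int) Int).insert (tc0, tg0, (0:Int)) 1)).items.map
      (fun kv => kv.2 * pvTerm kv.1.1 kv.1.2.1 kv.1.2.2)).sum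
      = pvWsum (ns.foldl pvStep ((PySem.Dict.empty : PySem.Dict (Int × Int × Int) Int).insert (tc0, tg0, (0:Int)) 1)).items [] := by
    simp only [pvWsum, pvF, pvTerm_eq]
  rw [hw, hsumF, hd0items]
  simp [pvWsum, pvF, pvDfs_emod]
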